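-- pv_equiv track=rewrite | github.com/recnet/Ngram-baseline | ngram.py | user_titles_table
-- ===== SOURCE A (Python) =====
-- def user_titles_table(raw_titles, raw_users):
--     """
--     :param raw_titles: list of titles from csv_reader
--     :param raw_users: list of users from csv_reader
--     :return: dictionary from users to a single long title (all their titles concatenated)
--     """
--     table = {}
--
--     for title, user in zip(raw_titles, raw_users):
--         if user not in table:
--             table[user] = []
--         table[user].append(title)
--
--     for key in table.keys():
--         table[key] = " ".join(table[key])
--
--     return table
-- ===== SOURCE B (Python) =====
-- def user_titles_table(raw_titles, raw_users):
--     """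
--     :param raw_titles: list of titles from csv_reader
--     :param raw_users: list of users from csv_reader
--     :return: dictionary from users to a single long title (all their titles concatenated)
--     """
--     table = {}
--     for title, user in zip(raw_titles, raw_users):
--         if user in table:
--             table[user] = table[user] + " " + title
--         else:
--             table[user] = title
--     return table
-- ===== Notes on version B (the rewrite author's own statement) =====
-- stated objective: simpler
-- what changed: Replaces the group-into-lists pass plus a second join pass with a single pass that accumulates each user's concatenated string directly in the dict, eliminating the per-user lists and the second loop.
import Mathlib
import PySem

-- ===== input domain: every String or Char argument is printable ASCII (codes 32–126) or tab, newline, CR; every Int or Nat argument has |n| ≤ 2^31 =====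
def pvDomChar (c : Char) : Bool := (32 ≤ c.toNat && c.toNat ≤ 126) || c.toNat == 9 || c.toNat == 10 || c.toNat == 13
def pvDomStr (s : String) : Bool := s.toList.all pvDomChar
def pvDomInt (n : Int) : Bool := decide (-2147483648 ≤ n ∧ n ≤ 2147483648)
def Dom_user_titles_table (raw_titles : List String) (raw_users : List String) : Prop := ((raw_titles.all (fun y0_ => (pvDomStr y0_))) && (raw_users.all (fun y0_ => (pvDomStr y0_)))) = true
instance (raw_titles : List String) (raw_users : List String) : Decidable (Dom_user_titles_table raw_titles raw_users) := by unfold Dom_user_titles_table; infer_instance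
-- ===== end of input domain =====

-- B replaces A's two-phase group-into-lists-then-join algorithm by a single pass that
-- accumulates each user's concatenated title string directly in the dict (objective: simpler).

-- ===== PORT A =====
-- Python mutates ONE dict, first holding lists then strings; typed ports must split this
-- into the list-valued dict and a fold over its keys rebuilding the string-valued dict
-- (same keys in the same order, each value overwritten by " ".join of the list).
def user_titles_table (raw_titles : List String) (raw_users : List String) : List (String × String) :=
  let table : PySem.Dict String (List String) :=
    (raw_titles.zip raw_users).foldl
      (fun table tu =>
        let table := if table.contains tu.2 then table else table.insert tu.2 []
        table.modify tu.2 [] (fun v => v ++ [tu.1]))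
      PySem.Dict.empty
  (table.keys.foldl
      (fun (out : PySem.Dict String String) key => out.insert key (PySem.Str.join " " (table.getD key [])))
      PySem.Dict.empty).items

-- ===== PORT B =====
def user_titles_table_alt (raw_titles : List String) (raw_users : List String) : List (String × String) :=
  ((raw_titles.zip raw_users).foldl
      (fun (table : PySem.Dict String String) tu =>
        if table.contains tu.2 then table.insert tu.2 (table.getD tu.2 "" ++ " " ++ tu.1)
        else table.insert tu.2 tu.1)
      PySem.Dict.empty).items

-- ===== PRECONDITION & SPEC =====
def Spec_user_titles_table (raw_titles : List String) (raw_users : List String) (out : List (String × String)) : Prop := out = user_titles_table_alt raw_titles raw_users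
instance (raw_titles : List String) (raw_users : List String) (out : List (String × String)) : Decidable (Spec_user_titles_table raw_titles raw_users out) := by unfold Spec_user_titles_table; infer_instance

-- ===== CLAIM (what is proved, stated in full; the proofs are below) =====
def Claim_equal_user_titles_table : Prop := ∀ (raw_titles : List String) (raw_users : List String), Dom_user_titles_table raw_titles raw_users → Spec_user_titles_table raw_titles raw_users (user_titles_table raw_titles raw_users)

-- ===== LEMMAS AND PROOFS =====

-- A's grouping step and B's accumulating step, as named functions for the lemmas.
def pvStepA (d : PySem.Dict String (List String)) (tu : String × String) : PySem.Dict String (List String) :=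
  (if d.contains tu.2 then d else d.insert tu.2 []).modify tu.2 [] (fun v => v ++ [tu.1])

def pvStepB (d : PySem.Dict String String) (tu : String × String) : PySem.Dict String String :=
  if d.contains tu.2 then d.insert tu.2 (d.getD tu.2 "" ++ " " ++ tu.1)
  else d.insert tu.2 tu.1

-- " ".join applied valuewise to a list-valued dict.
def pvMapJoin (d : PySem.Dict String (List String)) : PySem.Dict String String :=
  PySem.Dict.mk (d.items.map (fun p => (p.1, PySem.Str.join " " p.2)))

lemma charsJoin_snoc (sep y : List Char) (xs : List (List Char)) (h : xs ≠ []) :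
    PySem.Chars.join sep (xs ++ [y]) = PySem.Chars.join sep xs ++ sep ++ y := by
  obtain ⟨a, xs', rfl⟩ := List.exists_cons_of_ne_nil h
  induction xs' generalizing a with
  | nil => simp [PySem.Chars.join_cons_cons, PySem.Chars.join_singleton]
  | cons b rest ih =>
      have := ih b
      simp only [List.cons_append, PySem.Chars.join_cons_cons] at *
      simp [this]

lemma joinStr_singleton (t : String) : PySem.Str.join " " [t] = t := by
  apply String.toList_inj.mp
  simp [PySem.Str.toList_join, PySem.Chars.join_singleton]

lemma joinStr_snoc (v : List String) (t : String) (h : v ≠ []) :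
    PySem.Str.join " " (v ++ [t]) = PySem.Str.join " " v ++ " " ++ t := by
  apply String.toList_inj.mp
  simp only [PySem.Str.toList_join, List.map_append, List.map_cons, List.map_nil,
    String.toList_append]
  exact charsJoin_snoc _ _ _ (by simpa using h)

lemma get?_pvMapJoin (d : PySem.Dict String (List String)) (k : String) :
    (pvMapJoin d).get? k = (d.get? k).map (PySem.Str.join " ") := by
  obtain ⟨l⟩ := d
  induction l with
  | nil => simp [pvMapJoin, PySem.Dict.get?]
  | cons p rest ih =>
      obtain ⟨pk, pv⟩ := p
      simp only [pvMapJoin, List.map_cons, PySem.Dict.get?_mk_cons] at *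
      by_cases h : pk = k
      · simp [h]
      · simp [h, ih]

lemma contains_pvMapJoin (d : PySem.Dict String (List String)) (k : String) :
    (pvMapJoin d).contains k = d.contains k := by
  rw [PySem.Dict.contains_eq_isSome_get?, PySem.Dict.contains_eq_isSome_get?,
    get?_pvMapJoin, Option.isSome_map]

lemma insert_pvMapJoin (d : PySem.Dict String (List String)) (k : String) (v : List String) :
    pvMapJoin (d.insert k v) = (pvMapJoin d).insert k (PySem.Str.join " " v) := by
  apply PySem.Dict.ext
  by_cases h : d.contains k
  · rw [show pvMapJoin (d.insert k v) = PySem.Dict.mk ((d.insert k v).items.map (fun p => (p.1, PySem.Str.join " " p.2))) from rfl,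
        PySem.Dict.items_insert_of_contains d v h,
        PySem.Dict.items_insert_of_contains (pvMapJoin d) (PySem.Str.join " " v)
          (by rw [contains_pvMapJoin]; exact h)]
    simp only [pvMapJoin, List.map_map]
    apply List.map_congr_left
    intro p _
    by_cases hp : p.1 = k <;> simp [hp]
  · rw [show pvMapJoin (d.insert k v) = PySem.Dict.mk ((d.insert k v).items.map (fun p => (p.1, PySem.Str.join " " p.2))) from rfl,
        PySem.Dict.items_insert_of_not_contains d v (by simpa using h),
        PySem.Dict.items_insert_of_not_contains (pvMapJoin d) (PySem.Str.join " " v)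
          (by rw [contains_pvMapJoin]; simpa using h)]
    simp [pvMapJoin]

lemma pvStepA_eq_insert (d : PySem.Dict String (List String)) (tu : String × String) :
    pvStepA d tu =
      if d.contains tu.2 then d.insert tu.2 (d.getD tu.2 [] ++ [tu.1])
      else d.insert tu.2 [tu.1] := by
  unfold pvStepA PySem.Dict.modify
  by_cases h : d.contains tu.2
  · simp [h]
  · simp [h, PySem.Dict.getD_insert_self, PySem.Dict.insert_insert_self]

lemma nodup_keys_pvStepA (d : PySem.Dict String (List String)) (tu : String × String)
    (h : d.keys.Nodup) : (pvStepA d tu).keys.Nodup := by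
  rw [pvStepA_eq_insert]
  by_cases hc : d.contains tu.2 <;> simp [hc, PySem.Dict.nodup_keys_insert, h]

lemma pvStep_commute (d : PySem.Dict String (List String)) (tu : String × String)
    (hne : ∀ p ∈ d.items, p.2 ≠ []) :
    pvStepB (pvMapJoin d) tu = pvMapJoin (pvStepA d tu) := by
  rw [pvStepA_eq_insert]
  unfold pvStepB
  by_cases h : d.contains tu.2
  · obtain ⟨v, hv⟩ : ∃ v, d.get? tu.2 = some v := by
      have := PySem.Dict.contains_eq_isSome_get? (d := d) (k := tu.2)
      rw [h] at this
      exact Option.isSome_iff_exists.mp this.symm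
    have hvne : v ≠ [] := hne _ (PySem.Dict.mem_items_of_get?_eq_some d hv)
    have hgd : d.getD tu.2 [] = v := PySem.Dict.getD_of_get?_eq_some d [] hv
    have hgj : (pvMapJoin d).getD tu.2 "" = PySem.Str.join " " v := by
      unfold PySem.Dict.getD
      rw [get?_pvMapJoin, hv]
      rfl
    simp only [contains_pvMapJoin, h, if_true, insert_pvMapJoin, hgd, hgj]
    rw [joinStr_snoc v tu.1 hvne]
  · simp [contains_pvMapJoin, h, insert_pvMapJoin, joinStr_singleton]

lemma pvFold_commute (l : List (String × String)) (d : PySem.Dict String (List String))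
    (hnd : d.keys.Nodup) (hne : ∀ p ∈ d.items, p.2 ≠ []) :
    l.foldl pvStepB (pvMapJoin d) = pvMapJoin (l.foldl pvStepA d) := by
  induction l generalizing d with
  | nil => rfl
  | cons tu rest ih =>
      simp only [List.foldl_cons, pvStep_commute d tu hne]
      apply ih
      · exact nodup_keys_pvStepA d tu hnd
      · intro p hp
        rw [pvStepA_eq_insert] at hp
        by_cases hc : d.contains tu.2 <;>
          simp only [hc, if_true] at hp <;>
          rcases (PySem.Dict.mem_items_insert _ _ _ _).mp hp with h1 | h1 <;>
          first
            | (subst h1; simp)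
            | exact hne _ h1.1

lemma nodup_keys_pvFoldA (l : List (String × String)) (d : PySem.Dict String (List String))
    (hnd : d.keys.Nodup) : (l.foldl pvStepA d).keys.Nodup := by
  induction l generalizing d with
  | nil => exact hnd
  | cons tu rest ih => exact ih _ (nodup_keys_pvStepA d tu hnd)

lemma second_pass_items (table : PySem.Dict String (List String)) (hnd : table.keys.Nodup) :
    (table.keys.foldl
        (fun (out : PySem.Dict String String) key =>
          out.insert key (PySem.Str.join " " (table.getD key [])))
        PySem.Dict.empty).items = (pvMapJoin table).items := by
  have hfresh := PySem.Dict.items_foldl_insert_fresh table.keys (fun a => a)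
      (fun key => PySem.Str.join " " (table.getD key []))
      (PySem.Dict.empty : PySem.Dict String String)
      (fun a _ => PySem.Dict.contains_empty a) (by simpa using hnd)
  simp only [] at hfresh
  rw [hfresh]
  have hitems := PySem.Dict.items_eq_map_keys table hnd []
  simp only [pvMapJoin, hitems, List.map_map]
  rfl

-- ===== VERDICT (by name: the statement is the Claim_ definition above) =====
theorem user_titles_table_spec : Claim_equal_user_titles_table := by
  intro raw_titles raw_users _
  unfold Spec_user_titles_table user_titles_table user_titles_table_alt
  have hA : ∀ (l : List (String × String)),
      l.foldl (fun table tu =>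
        (if table.contains tu.2 then table else table.insert tu.2 []).modify tu.2 []
          (fun v => v ++ [tu.1])) PySem.Dict.empty = l.foldl pvStepA PySem.Dict.empty :=
    fun _ => rfl
  have hB : ∀ (l : List (String × String)),
      l.foldl (fun (table : PySem.Dict String String) tu =>
        if table.contains tu.2 then table.insert tu.2 (table.getD tu.2 "" ++ " " ++ tu.1)
        else table.insert tu.2 tu.1) PySem.Dict.empty = l.foldl pvStepB PySem.Dict.empty :=
    fun _ => rfl
  rw [hA, hB]
  set l := raw_titles.zip raw_users
  have hnd0 : (PySem.Dict.empty : PySem.Dict String (List String)).keys.Nodup :=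
    PySem.Dict.nodup_keys_empty
  rw [second_pass_items _ (nodup_keys_pvFoldA l _ hnd0),
    ← pvFold_commute l PySem.Dict.empty hnd0 (by intro p hp; simp [PySem.Dict.empty] at hp)]
  rfl
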